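-- pv_equiv track=rewrite | github.com/vinchinzu/euler | python/360.py | count_and_sum_quadrants_improved
-- ===== SOURCE A (Python) =====
-- from typing import Tuple
--
-- OCTANT_MULTIPLIER: int = 8
--
-- PLANE_MULTIPLIER: int = 4
--
-- AXIS_MULTIPLIER: int = 2
--
-- def count_and_sum_quadrants_improved(a: int, b: int, c: int) -> Tuple[int, int]:
--     """Return (count, manhattan_sum) over all sign-variants of (a, b, c).
--
--     The result exploits symmetry:
--     - 3 non-zero coords: 8 symmetric points.
--     - 2 non-zero, 1 zero: 4 symmetric points (lying in coordinate planes).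
--     - 1 non-zero, 2 zero: 2 symmetric points (lying on axes).
--     - all zero: the origin.
--     """
--
--     coords = (a, b, c)
--     zero_count = sum(1 for v in coords if v == 0)
--     non_zero_coords = [v for v in coords if v != 0]
--
--     if zero_count == 0:
--         # All three non-zero
--         manhattan = sum(non_zero_coords)
--         return OCTANT_MULTIPLIER, OCTANT_MULTIPLIER * manhattan
--     if zero_count == 1:
--         # Exactly one zero
--         manhattan = sum(non_zero_coords)
--         return PLANE_MULTIPLIER, PLANE_MULTIPLIER * manhattan
--     if zero_count == 2:
--         # Exactly two zeros
--         non_zero = non_zero_coords[0]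
--         return AXIS_MULTIPLIER, AXIS_MULTIPLIER * non_zero
--     if zero_count == 3:
--         # All zeros (origin)
--         return 1, 0
--
--     msg = "Invalid coordinates"
--     raise ValueError(msg)
-- ===== SOURCE B (Python) =====
-- from typing import Tuple
--
-- def count_and_sum_quadrants_improved(a: int, b: int, c: int) -> Tuple[int, int]:
--     """Closed form: count = 2**(number of nonzero coords); zeros add nothing to the sum."""
--     count = 2 ** ((a != 0) + (b != 0) + (c != 0))
--     return count, count * (a + b + c)
-- ===== Notes on version B (the rewrite author's own statement) =====
-- stated objective: simpler
-- what changed: Replaces A's four-way branch on the zero count (with list building and per-case multipliers) by one arithmetic closed form: count = 2**(number of nonzero coordinates) and sum = count*(a+b+c).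
import Mathlib
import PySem

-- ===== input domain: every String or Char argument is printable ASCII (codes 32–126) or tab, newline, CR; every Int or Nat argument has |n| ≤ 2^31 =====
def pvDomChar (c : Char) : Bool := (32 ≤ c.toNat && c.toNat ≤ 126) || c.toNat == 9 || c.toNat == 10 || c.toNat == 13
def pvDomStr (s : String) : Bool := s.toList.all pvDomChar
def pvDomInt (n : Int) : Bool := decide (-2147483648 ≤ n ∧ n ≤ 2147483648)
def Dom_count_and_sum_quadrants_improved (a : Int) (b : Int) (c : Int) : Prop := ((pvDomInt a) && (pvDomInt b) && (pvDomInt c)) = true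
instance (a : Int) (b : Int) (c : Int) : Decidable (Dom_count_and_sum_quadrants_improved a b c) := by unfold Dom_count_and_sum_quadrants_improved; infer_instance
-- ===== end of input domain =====

-- B replaces A's four-way branch on the zero count by the closed form count = 2^(#nonzeros), sum = count*(a+b+c) (objective: simpler).

-- ===== PORT A =====
-- literal port: zero_count over the coordinate list, non-zero filter, then the branch chain
def count_and_sum_quadrants_improved (a : Int) (b : Int) (c : Int) : Int × Int :=
  let coords : List Int := [a, b, c]
  let zero_count : Int := (coords.filter (fun v => v == 0)).foldl (fun s _ => s + 1) 0
  let non_zero_coords : List Int := coords.filter (fun v => !(v == 0))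
  if zero_count == 0 then
    let manhattan := non_zero_coords.foldl (· + ·) 0
    (8, 8 * manhattan)
  else if zero_count == 1 then
    let manhattan := non_zero_coords.foldl (· + ·) 0
    (4, 4 * manhattan)
  else if zero_count == 2 then
    let non_zero := non_zero_coords.headD 0  -- zero_count == 2 guarantees one element; Python indexes [0]
    (2, 2 * non_zero)
  else
    (1, 0)  -- zero_count == 3; the ValueError branch is unreachable

-- ===== PORT B =====
def count_and_sum_quadrants_improved_alt (a : Int) (b : Int) (c : Int) : Int × Int :=
  let nz : Nat := (if a ≠ 0 then 1 else 0) + (if b ≠ 0 then 1 else 0) + (if c ≠ 0 then 1 else 0)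
  let count : Int := 2 ^ nz
  (count, count * (a + b + c))

-- ===== PRECONDITION & SPEC =====
def Spec_count_and_sum_quadrants_improved (a : Int) (b : Int) (c : Int) (out : Int × Int) : Prop := out = count_and_sum_quadrants_improved_alt a b c
instance (a : Int) (b : Int) (c : Int) (out : Int × Int) : Decidable (Spec_count_and_sum_quadrants_improved a b c out) := by unfold Spec_count_and_sum_quadrants_improved; infer_instance

-- ===== CLAIM (what is proved, stated in full; the proofs are below) =====
def Claim_equal_count_and_sum_quadrants_improved : Prop := ∀ (a : Int) (b : Int) (c : Int), Dom_count_and_sum_quadrants_improved a b c → Spec_count_and_sum_quadrants_improved a b c (count_and_sum_quadrants_improved a b c)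

-- ===== LEMMAS AND PROOFS =====

-- ===== VERDICT (by name: the statement is the Claim_ definition above) =====
theorem count_and_sum_quadrants_improved_spec : Claim_equal_count_and_sum_quadrants_improved := by
  intro a b c _
  unfold Spec_count_and_sum_quadrants_improved count_and_sum_quadrants_improved count_and_sum_quadrants_improved_alt
  by_cases ha : a = 0 <;> by_cases hb : b = 0 <;> by_cases hc : c = 0 <;>
    · have ha' : (a == 0) = decide (a = 0) := rfl
      have hb' : (b == 0) = decide (b = 0) := rfl
      have hc' : (c == 0) = decide (c = 0) := rfl
      simp [ha', hb', hc', ha, hb, hc, List.filter, List.foldl]
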